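-- pv_equiv track=rewrite | github.com/BrownFortress/rmp | graph.py | get_max_at_min
-- ===== SOURCE A (Python) =====
-- def get_max_at_min(lengths, costs):
--     max_len = max(lengths)
--     new_l = []
--     new_c = []
--     for idx, x in enumerate(lengths):
--         if x == max_len:
--             new_l.append(x)
--             new_c.append(costs[idx])
--     id_best = new_c.index(min(new_c))
--
--     return new_l[id_best], min(new_c)
-- ===== SOURCE B (Python) =====
-- def get_max_at_min(lengths, costs):
--     best = None
--     for idx, x in enumerate(lengths):
--         if best is None or x > best[0]:
--             best = (x, costs[idx])
--         elif x == best[0]: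
--             c = costs[idx]
--             if c < best[1]:
--                 best = (x, c)
--     if best is None:
--         raise ValueError("get_max_at_min() arg is an empty sequence")
--     return best
-- ===== Notes on version B (the rewrite author's own statement) =====
-- stated objective: alternative
-- what changed: Replaces A's multi-pass pipeline (max, build filtered length/cost lists, min, list.index, re-index) with a single running-best fold over enumerate(lengths) that keeps (best_len, best_cost).
import Mathlib
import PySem

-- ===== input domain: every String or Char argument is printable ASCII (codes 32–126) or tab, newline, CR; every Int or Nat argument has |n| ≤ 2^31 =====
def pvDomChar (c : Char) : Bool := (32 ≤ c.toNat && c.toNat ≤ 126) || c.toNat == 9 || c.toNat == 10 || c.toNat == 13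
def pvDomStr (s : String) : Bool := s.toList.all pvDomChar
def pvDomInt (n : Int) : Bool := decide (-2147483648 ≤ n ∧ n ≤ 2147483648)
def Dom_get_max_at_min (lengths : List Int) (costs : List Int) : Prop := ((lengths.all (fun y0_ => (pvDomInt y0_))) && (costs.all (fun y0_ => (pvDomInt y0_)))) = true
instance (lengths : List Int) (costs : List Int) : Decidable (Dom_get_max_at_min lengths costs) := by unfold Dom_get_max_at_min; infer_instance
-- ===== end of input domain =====

-- B replaces A's multi-pass pipeline (max, filtered lists, min, index, re-index) with one running-best fold over enumerate(lengths); same O(n) cost, different decomposition.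


-- ===== PORT A =====
-- literal port of A; the 'none'/default branches are unreachable under Pre_ (they are Python's ValueError/IndexError)
def get_max_at_min (lengths : List Int) (costs : List Int) : Int × Int :=
  match PySem.List.max? lengths (fun y => y) with
  | none => (0, 0)  -- max([]) : ValueError, excluded by Pre_
  | some max_len =>
    let s := (PySem.List.enumerate lengths 0).foldl
      (fun (s : List Int × List Int) p =>
        if p.2 == max_len then (s.1 ++ [p.2], s.2 ++ [PySem.List.pyGetD costs p.1 0]) else s)
      ([], [])
    match PySem.List.min? s.2 (fun y => y) with
    | none => (0, 0)  -- unreachable: s.2 nonempty when lengths nonempty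
    | some m =>
      match PySem.List.index? s.2 m with
      | none => (0, 0)  -- unreachable: m ∈ s.2
      | some id_best => (PySem.List.pyGetD s.1 (id_best : Int) 0, m)

-- ===== PORT B =====
-- one step of Source B's loop body (state = Python's 'best', None before the first element)
def altStep (costs : List Int) (s : Option (Int × Int)) (p : Int × Int) : Option (Int × Int) :=
  match s with
  | none => some (p.2, PySem.List.pyGetD costs p.1 0)
  | some b =>
    if b.1 < p.2 then some (p.2, PySem.List.pyGetD costs p.1 0)
    else if p.2 == b.1 then
      let c := PySem.List.pyGetD costs p.1 0
      if c < b.2 then some (p.2, c) else some b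
    else some b

def get_max_at_min_alt (lengths : List Int) (costs : List Int) : Int × Int :=
  match (PySem.List.enumerate lengths 0).foldl (altStep costs) none with
  | none => (0, 0)  -- empty lengths: ValueError, excluded by Pre_
  | some b => b

-- ===== PRECONDITION & SPEC =====
-- Pre_ excludes exactly the inputs on which Python A raises: empty lengths (ValueError from max)
-- and inputs where some index holding the maximum of lengths is out of range for costs (IndexError).
def Pre_get_max_at_min (lengths : List Int) (costs : List Int) : Prop :=
  lengths ≠ [] ∧ ∀ i : Nat, i < lengths.length →
    (∀ j : Nat, j < lengths.length → lengths.getD j 0 ≤ lengths.getD i 0) → i < costs.length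
instance (lengths : List Int) (costs : List Int) : Decidable (Pre_get_max_at_min lengths costs) := by
  unfold Pre_get_max_at_min; infer_instance
def pvWitness_get_max_at_min : List Int × List Int := ([2, 1, 2], [5, 9, 3])

def Spec_get_max_at_min (lengths : List Int) (costs : List Int) (out : Int × Int) : Prop := out = get_max_at_min_alt lengths costs
instance (lengths : List Int) (costs : List Int) (out : Int × Int) : Decidable (Spec_get_max_at_min lengths costs out) := by unfold Spec_get_max_at_min; infer_instance

-- ===== CLAIM (what is proved, stated in full; the proofs are below) =====
def Claim_equal_get_max_at_min : Prop := ∀ (lengths : List Int) (costs : List Int), Dom_get_max_at_min lengths costs → Pre_get_max_at_min lengths costs → Spec_get_max_at_min lengths costs (get_max_at_min lengths costs)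

-- ===== LEMMAS AND PROOFS =====

-- the cost read at an enumerate pair
def pvCost (costs : List Int) (p : Int × Int) : Int := PySem.List.pyGetD costs p.1 0

-- B's fold, once the running best equals the maximum of everything remaining:
-- it only folds 'min' over the equal-to-best entries.
lemma alt_fold_at_max (costs : List Int) (ps : List (Int × Int)) (bl : Int)
    (h : ∀ p ∈ ps, p.2 ≤ bl) : ∀ bc : Int,
    ps.foldl (altStep costs) (some (bl, bc)) =
      some (bl, (ps.filter (fun p => p.2 == bl)).foldl (fun a p => min a (pvCost costs p)) bc) := by
  induction ps with
  | nil => intro bc; simp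
  | cons p rest ih =>
    intro bc
    have hp : p.2 ≤ bl := h p (by simp)
    have hrest : ∀ q ∈ rest, q.2 ≤ bl := fun q hq => h q (by simp [hq])
    by_cases he : p.2 = bl
    · have hstep : altStep costs (some (bl, bc)) p = some (bl, min bc (pvCost costs p)) := by
        unfold altStep; dsimp only
        rw [if_neg (by omega), if_pos (by simp [he])]
        by_cases h3 : PySem.List.pyGetD costs p.1 0 < bc
        · rw [if_pos h3]; simp [pvCost, he, min_def]; omega
        · rw [if_neg h3]; simp [pvCost, min_def]; omega
      simp only [List.foldl_cons, hstep]
      simp [he, ih hrest]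
    · have hlt : p.2 < bl := lt_of_le_of_ne hp he
      have hstep : altStep costs (some (bl, bc)) p = some (bl, bc) := by
        unfold altStep; dsimp only
        rw [if_neg (by omega), if_neg (by simp [he])]
      simp only [List.foldl_cons, hstep]
      simp [he, ih hrest]

-- B's fold from a state strictly below the maximum M (or from none): it ends at
-- (M, min of the costs at the M-positions), with the first M-position's cost as seed.
lemma alt_fold_main (costs : List Int) (M : Int) :
    ∀ (ps : List (Int × Int)), (∀ p ∈ ps, p.2 ≤ M) → M ∈ ps.map (·.2) →
    ∀ s : Option (Int × Int), (s = none ∨ ∃ bl bc, s = some (bl, bc) ∧ bl < M) →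
    ∃ p0 t, ps.filter (fun p => p.2 == M) = p0 :: t ∧
      ps.foldl (altStep costs) s =
        some (M, t.foldl (fun a p => min a (pvCost costs p)) (pvCost costs p0)) := by
  intro ps
  induction ps with
  | nil => intro _ hm; simp at hm
  | cons p rest ih =>
    intro hle hm s hs
    have hp : p.2 ≤ M := hle p (by simp)
    have hrest : ∀ q ∈ rest, q.2 ≤ M := fun q hq => hle q (by simp [hq])
    by_cases he : p.2 = M
    · -- the running best becomes (M, cost p); the rest only min's over M-entries
      have hstep : (p :: rest).foldl (altStep costs) s =
          rest.foldl (altStep costs) (some (M, pvCost costs p)) := by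
        rcases hs with h0 | ⟨bl, bc, rfl, hblt⟩
        · simp [h0, altStep, pvCost, he]
        · simp only [List.foldl_cons]
          have : altStep costs (some (bl, bc)) p = some (M, pvCost costs p) := by
            simp [altStep, pvCost, he]; omega
          rw [this]
      refine ⟨p, rest.filter (fun q => q.2 == M), ?_, ?_⟩
      · simp [he]
      · rw [hstep, alt_fold_at_max costs rest M hrest]
    · have hlt : p.2 < M := lt_of_le_of_ne hp he
      have hm' : M ∈ rest.map (·.2) := by
        simp only [List.map_cons, List.mem_cons] at hm
        rcases hm with h | h
        · exact absurd h.symm he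
        · exact h
      have hstep : ∃ bl bc, (p :: rest).foldl (altStep costs) s =
          rest.foldl (altStep costs) (some (bl, bc)) ∧ bl < M := by
        rcases hs with h0 | ⟨bl, bc, rfl, hblt⟩
        · exact ⟨p.2, pvCost costs p, by simp [h0, altStep, pvCost], hlt⟩
        · simp only [List.foldl_cons]
          by_cases h1 : bl < p.2
          · refine ⟨p.2, PySem.List.pyGetD costs p.1 0, ?_, hlt⟩
            unfold altStep; dsimp only; rw [if_pos h1]
          · by_cases h2 : p.2 = bl
            · by_cases h3 : PySem.List.pyGetD costs p.1 0 < bc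
              · refine ⟨p.2, PySem.List.pyGetD costs p.1 0, ?_, hlt⟩
                unfold altStep; dsimp only; rw [if_neg h1, if_pos (by simp [h2]), if_pos h3]
              · refine ⟨bl, bc, ?_, hblt⟩
                unfold altStep; dsimp only; rw [if_neg h1, if_pos (by simp [h2]), if_neg h3]
            · refine ⟨bl, bc, ?_, hblt⟩
              unfold altStep; dsimp only; rw [if_neg h1, if_neg (by simp [h2])]
      obtain ⟨bl, bc, hfold, hblt⟩ := hstep
      obtain ⟨p0, t, hf, hres⟩ := ih hrest hm' (some (bl, bc)) (Or.inr ⟨bl, bc, rfl, hblt⟩)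
      refine ⟨p0, t, ?_, ?_⟩
      · simp [he, hf]
      · rw [hfold, hres]

-- ===== VERDICT (by name: the statement is the Claim_ definition above) =====
theorem get_max_at_min_spec : Claim_equal_get_max_at_min := by
  intro lengths costs _ hpre
  unfold Spec_get_max_at_min
  obtain ⟨hne, -⟩ := hpre
  obtain ⟨M, hM⟩ : ∃ M, PySem.List.max? lengths (fun y => y) = some M := by
    cases hmx : PySem.List.max? lengths (fun y => y) with
    | none => exact absurd ((PySem.List.max?_eq_none_iff lengths (fun y => y)).mp hmx) hne
    | some M => exact ⟨M, rfl⟩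
  have hMmem : M ∈ lengths := PySem.List.max?_mem hM
  have hMmax : ∀ y ∈ lengths, y ≤ M := fun y hy => PySem.List.max?_isMax hM y hy
  have hsnd : (PySem.List.enumerate lengths 0).map (·.2) = lengths :=
    PySem.List.map_snd_enumerate lengths 0
  have hle : ∀ p ∈ PySem.List.enumerate lengths 0, p.2 ≤ M := by
    intro p hp
    exact hMmax p.2 (by rw [← hsnd]; exact List.mem_map_of_mem hp)
  have hmm : M ∈ (PySem.List.enumerate lengths 0).map (·.2) := by rw [hsnd]; exact hMmem
  obtain ⟨p0, t, hf, hfold⟩ := alt_fold_main costs M (PySem.List.enumerate lengths 0) hle hmm none (Or.inl rfl)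
  -- B's value
  have hB : get_max_at_min_alt lengths costs =
      (M, t.foldl (fun a p => min a (pvCost costs p)) (pvCost costs p0)) := by
    unfold get_max_at_min_alt
    rw [hfold]
  -- A's pair-building loop is the two filtered maps
  have hA2 : (PySem.List.enumerate lengths 0).foldl
      (fun (s : List Int × List Int) p =>
        if p.2 == M then (s.1 ++ [p.2], s.2 ++ [PySem.List.pyGetD costs p.1 0]) else s) ([], []) =
      (((PySem.List.enumerate lengths 0).filter (fun p => p.2 == M)).map (·.2),
       ((PySem.List.enumerate lengths 0).filter (fun p => p.2 == M)).map (fun p => PySem.List.pyGetD costs p.1 0)) := by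
    rw [PySem.List.foldl_congr_mem (PySem.List.enumerate lengths 0) _
      (fun (s : List Int × List Int) (p : Int × Int) =>
        ((if p.2 == M then s.1 ++ [p.2] else s.1),
         (if p.2 == M then s.2 ++ [PySem.List.pyGetD costs p.1 0] else s.2))) ([], [])
      (by intro acc x _; by_cases h : x.2 == M <;> simp [h])]
    rw [PySem.List.foldl_prod_mk
      (fun (acc : List Int) (p : Int × Int) => if p.2 == M then acc ++ [p.2] else acc)
      (fun (acc : List Int) (p : Int × Int) => if p.2 == M then acc ++ [PySem.List.pyGetD costs p.1 0] else acc)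
      (PySem.List.enumerate lengths 0) [] []]
    rw [PySem.List.foldl_append_if, PySem.List.foldl_append_if]
    simp
  -- assemble A's result
  have hmin : PySem.List.min? ((p0 :: t).map (fun p => pvCost costs p)) (fun y => y) =
      some (t.foldl (fun a p => min a (pvCost costs p)) (pvCost costs p0)) := by
    rw [List.map_cons, PySem.List.min?_id_cons, List.foldl_map]
  unfold get_max_at_min
  rw [hM]
  dsimp only
  rw [hA2, hf]
  dsimp only
  have hmin' : PySem.List.min? ((p0 :: t).map (fun p => PySem.List.pyGetD costs p.1 0)) (fun y => y) =
      some (t.foldl (fun a p => min a (pvCost costs p)) (pvCost costs p0)) := by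
    simpa [pvCost] using hmin
  rw [hmin']
  dsimp only
  set m := t.foldl (fun a p => min a (pvCost costs p)) (pvCost costs p0) with hm
  have hmem : m ∈ (p0 :: t).map (fun p => PySem.List.pyGetD costs p.1 0) :=
    PySem.List.min?_mem hmin'
  obtain ⟨i, hi⟩ : ∃ i, PySem.List.index? ((p0 :: t).map (fun p => PySem.List.pyGetD costs p.1 0)) m = some i := by
    have := (PySem.List.index?_isSome_iff (xs := (p0 :: t).map (fun p => PySem.List.pyGetD costs p.1 0)) (v := m)).mpr hmem
    exact Option.isSome_iff_exists.mp this
  rw [hi]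
  dsimp only
  have hilt : i < ((p0 :: t).map (fun p => PySem.List.pyGetD costs p.1 0)).length := by
    rw [PySem.List.index?_eq_idxOf?, List.idxOf?_eq_some_iff] at hi
    exact hi.1
  have hilt' : i < ((p0 :: t).map (·.2)).length := by
    simpa using (by simpa using hilt : i < t.length + 1)
  have hall : ∀ q ∈ p0 :: t, q.2 = M := by
    intro q hq
    have := List.of_mem_filter (hf ▸ hq)
    simpa using this
  have hget : PySem.List.pyGetD ((p0 :: t).map (·.2)) (i : Int) 0 = M := by
    rw [PySem.List.pyGetD_natCast, List.getD_eq_getElem _ _ hilt', List.getElem_map]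
    exact hall _ (List.getElem_mem _)
  rw [hget, hB]
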